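-- pv_equiv track=rewrite | github.com/ItsTarras/262-Modules | dumbo_function.py | dumbo_func
-- ===== SOURCE A (Python) =====
-- def dumbo_func(data, i=0):
--     """Takes a list of numbers and does weird stuff with it"""
--     if len(data) == 0:
--         return 0
--     else:
--         if i < len(data):
--             if (data[i] // 100) % 3 != 0:
--                 return 1 + dumbo_func(data, i + 1)
--             else:
--                 return dumbo_func(data, i + 1)
--         else:
--             return 0
-- ===== SOURCE B (Python) =====
-- def dumbo_func(data, i=0):
--     """Takes a list of numbers and does weird stuff with it"""
--     total = 0
--     for j in range(i, len(data)):
--         if (data[j] // 100) % 3 != 0: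
--             total += 1
--     return total
-- ===== Notes on version B (the rewrite author's own statement) =====
-- stated objective: idiomatic
-- what changed: Replaces the unbounded self-recursion (one Python stack frame per element) with a single iterative for-loop over range(i, len(data)) accumulating a counter.
-- outside the precondition, e.g. on dumbo_func([], -1): A returns 0, B raises IndexError
import Mathlib
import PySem

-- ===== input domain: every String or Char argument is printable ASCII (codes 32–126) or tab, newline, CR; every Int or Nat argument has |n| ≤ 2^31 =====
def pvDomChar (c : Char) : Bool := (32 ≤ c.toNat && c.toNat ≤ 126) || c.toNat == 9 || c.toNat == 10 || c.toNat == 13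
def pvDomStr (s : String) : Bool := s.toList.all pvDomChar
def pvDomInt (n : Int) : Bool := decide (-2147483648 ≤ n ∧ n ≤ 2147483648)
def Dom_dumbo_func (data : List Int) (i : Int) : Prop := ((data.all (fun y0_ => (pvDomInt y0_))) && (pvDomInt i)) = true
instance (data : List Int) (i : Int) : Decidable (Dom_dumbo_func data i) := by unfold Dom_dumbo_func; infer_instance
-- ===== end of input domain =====

-- B replaces A's unbounded self-recursion by a single iterative counting loop over range(i, len(data)).

-- ===== PORT A =====
def dumbo_func (data : List Int) (i : Int) : Int :=
  if data.length = 0 then 0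
  else if _h : i < (data.length : Int) then
    match PySem.List.pyGet? data i with
    | some x =>
        if PySem.Int.mod (PySem.Int.floordiv x 100) 3 ≠ 0 then
          1 + dumbo_func data (i + 1)
        else
          dumbo_func data (i + 1)
    | none => 0   -- data[i] raises IndexError in Python (i < -len(data)); excluded by Pre_
  else 0
termination_by ((data.length : Int) - i).toNat
decreasing_by all_goals omega

-- ===== PORT B =====
def dumbo_func_alt (data : List Int) (i : Int) : Int :=
  (PySem.List.pyRange i (data.length : Int) 1).foldl
    (fun total j =>
      if PySem.Int.mod (PySem.Int.floordiv (PySem.List.pyGetD data j 0) 100) 3 ≠ 0 then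
        total + 1
      else total)
    0

-- ===== PRECONDITION & SPEC =====
-- Pre_ excludes i < -len(data): there Python A raises IndexError except in the degenerate case
-- data = [] (where A short-circuits to 0 but B's uniform index loop raises IndexError).
def Pre_dumbo_func (data : List Int) (i : Int) : Prop := -(data.length : Int) ≤ i
instance (data : List Int) (i : Int) : Decidable (Pre_dumbo_func data i) := by unfold Pre_dumbo_func; infer_instance
def pvWitness_dumbo_func : List Int × Int := ([150, 300, -250], -2)

def Spec_dumbo_func (data : List Int) (i : Int) (out : Int) : Prop := out = dumbo_func_alt data i
instance (data : List Int) (i : Int) (out : Int) : Decidable (Spec_dumbo_func data i out) := by unfold Spec_dumbo_func; infer_instance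

-- ===== CLAIM (what is proved, stated in full; the proofs are below) =====
def Claim_equal_dumbo_func : Prop := ∀ (data : List Int) (i : Int), Dom_dumbo_func data i → Pre_dumbo_func data i → Spec_dumbo_func data i (dumbo_func data i)

-- ===== LEMMAS AND PROOFS =====

lemma pvFoldl_shift (data : List Int) (l : List Int) (a : Int) :
    l.foldl (fun total j => if PySem.Int.mod (PySem.Int.floordiv (PySem.List.pyGetD data j 0) 100) 3 ≠ 0 then total + 1 else total) a
      = a + l.foldl (fun total j => if PySem.Int.mod (PySem.Int.floordiv (PySem.List.pyGetD data j 0) 100) 3 ≠ 0 then total + 1 else total) 0 := by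
  induction l generalizing a with
  | nil => simp
  | cons x xs ih =>
    simp only [List.foldl_cons]
    rw [ih, ih (if PySem.Int.mod (PySem.Int.floordiv (PySem.List.pyGetD data x 0) 100) 3 ≠ 0 then (0:Int) + 1 else 0)]
    split_ifs <;> ring

lemma pvGetD_eq_of_get?_some (data : List Int) (i x : Int)
    (h : PySem.List.pyGet? data i = some x) :
    PySem.List.pyGetD data i 0 = x := by
  simp only [PySem.List.pyGetD, PySem.List.pyGet?] at h ⊢
  rw [h]
  rfl

lemma pvMain (data : List Int) : ∀ (n : Nat) (i : Int),
    -(data.length : Int) ≤ i → (((data.length : Int) - i).toNat = n) →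
    dumbo_func data i = dumbo_func_alt data i := by
  intro n
  induction n with
  | zero =>
    intro i hpre hn
    have hge : (data.length : Int) ≤ i := by omega
    rw [dumbo_func, dumbo_func_alt, PySem.List.pyRange_one_eq_nil hge]
    simp
    intro _ h
    omega
  | succ m ih =>
    intro i hpre hn
    have hlt : i < (data.length : Int) := by omega
    have hne : data.length ≠ 0 := by omega
    have hsome : ∃ x, PySem.List.pyGet? data i = some x := by
      cases hx : PySem.List.pyGet? data i with
      | some x => exact ⟨x, rfl⟩
      | none =>
        rw [PySem.List.pyGet?_eq_none_iff] at hx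
        exact absurd (by constructor <;> omega) hx
    obtain ⟨x, hx⟩ := hsome
    have hxd : PySem.List.pyGetD data i 0 = x := pvGetD_eq_of_get?_some data i x hx
    have ihx : dumbo_func data (i + 1) = dumbo_func_alt data (i + 1) :=
      ih (i + 1) (by omega) (by omega)
    rw [dumbo_func]
    simp only [hne, if_false, hlt, dif_pos, hx]
    rw [dumbo_func_alt, PySem.List.pyRange_one_cons hlt, List.foldl_cons]
    have hrest :
        (PySem.List.pyRange (i + 1) (data.length : Int) 1).foldl
          (fun total j => if PySem.Int.mod (PySem.Int.floordiv (PySem.List.pyGetD data j 0) 100) 3 ≠ 0 then total + 1 else total)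
          (if PySem.Int.mod (PySem.Int.floordiv (PySem.List.pyGetD data i 0) 100) 3 ≠ 0 then (0:Int) + 1 else 0)
        = (if PySem.Int.mod (PySem.Int.floordiv (PySem.List.pyGetD data i 0) 100) 3 ≠ 0 then (0:Int) + 1 else 0) + dumbo_func_alt data (i + 1) := by
      rw [pvFoldl_shift]; rfl
    show (if PySem.Int.mod (PySem.Int.floordiv x 100) 3 ≠ 0 then
            1 + dumbo_func data (i + 1) else dumbo_func data (i + 1))
        = (PySem.List.pyRange (i + 1) (data.length : Int) 1).foldl
            (fun total j => if PySem.Int.mod (PySem.Int.floordiv (PySem.List.pyGetD data j 0) 100) 3 ≠ 0 then total + 1 else total)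
            (if PySem.Int.mod (PySem.Int.floordiv (PySem.List.pyGetD data i 0) 100) 3 ≠ 0 then (0:Int) + 1 else 0)
    rw [hrest, ihx]
    by_cases hc : PySem.Int.mod (PySem.Int.floordiv (PySem.List.pyGetD data i 0) 100) 3 ≠ 0
    · have hP : PySem.Int.mod (PySem.Int.floordiv x 100) 3 ≠ 0 := by
        rwa [hxd] at hc
      rw [if_pos hP, if_pos hc]; ring
    · have hP : ¬ PySem.Int.mod (PySem.Int.floordiv x 100) 3 ≠ 0 := by
        rwa [hxd] at hc
      rw [if_neg hP, if_neg hc]; ring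

-- ===== VERDICT (by name: the statement is the Claim_ definition above) =====
theorem dumbo_func_spec : Claim_equal_dumbo_func := by
  intro data i _ hpre
  exact pvMain data (((data.length : Int) - i).toNat) i hpre rfl
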